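-- pv_equiv track=rewrite | github.com/Tyson89/RaG-PBO-Builder | rag_build_pipeline.py | parse_tool_output_summary
-- ===== SOURCE A (Python) =====
-- def parse_tool_output_summary(tool_name, lines):
--     summary = {
--         "errors": 0,
--         "warnings": 0,
--         "missing": 0,
--         "model": 0,
--         "texture": 0,
--     }
--
--     for line in lines:
--         lower = line.lower()
--
--         if "error" in lower or "cannot" in lower or "failed" in lower or "bad version" in lower:
--             summary["errors"] += 1
--
--         if "warning" in lower or "unsupported" in lower:
--             summary["warnings"] += 1
--
--         if "missing" in lower or "cannot open" in lower or "cannot load" in lower: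
--             summary["missing"] += 1
--
--         if "model" in lower or "model.cfg" in lower or "skeleton" in lower:
--             summary["model"] += 1
--
--         if "texture" in lower or ".paa" in lower or ".rvmat" in lower:
--             summary["texture"] += 1
--
--     return summary
-- ===== SOURCE B (Python) =====
-- def parse_tool_output_summary(tool_name, lines):
--     lows = [line.lower() for line in lines]
--
--     def hits(subs):
--         return sum(1 for low in lows if any(s in low for s in subs))
--
--     return {
--         "errors": hits(("error", "cannot", "failed", "bad version")),
--         "warnings": hits(("warning", "unsupported")),
--         "missing": hits(("missing", "cannot open", "cannot load")),
--         # "model.cfg" from A is redundant: any line containing "model.cfg" contains "model"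
--         "model": hits(("model", "skeleton")),
--         "texture": hits(("texture", ".paa", ".rvmat")),
--     }
-- ===== Notes on version B (the rewrite author's own statement) =====
-- stated objective: alternative
-- what changed: Replaces A's single pass that mutates a five-counter dict per line with five independent per-category counting passes (sum/any over the pre-lowercased lines, no accumulator dict), and drops the redundant trigger 'model.cfg' (subsumed by 'model').
import Mathlib
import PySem

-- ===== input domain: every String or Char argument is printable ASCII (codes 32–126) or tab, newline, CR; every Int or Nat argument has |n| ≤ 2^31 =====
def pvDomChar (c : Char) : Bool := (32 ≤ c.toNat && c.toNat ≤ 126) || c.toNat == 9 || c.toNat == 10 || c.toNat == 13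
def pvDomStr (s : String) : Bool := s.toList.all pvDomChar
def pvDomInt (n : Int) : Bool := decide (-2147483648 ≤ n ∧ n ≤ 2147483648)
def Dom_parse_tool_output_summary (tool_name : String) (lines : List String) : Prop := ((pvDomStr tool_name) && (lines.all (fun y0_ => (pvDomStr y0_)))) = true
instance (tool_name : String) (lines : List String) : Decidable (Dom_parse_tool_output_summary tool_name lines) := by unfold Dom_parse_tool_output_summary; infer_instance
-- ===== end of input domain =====

-- B replaces A's single pass mutating a five-counter dict with five independent
-- per-category counting passes over the pre-lowercased lines (and drops the
-- redundant trigger "model.cfg", which is subsumed by "model"); same cost.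

-- ===== PORT A =====
-- loop body of A's for-loop, step for step
def pvStepA (summary : PySem.Dict String Int) (line : String) : PySem.Dict String Int :=
  let lower := PySem.Str.lower line
  let summary := if PySem.Str.isIn "error" lower || PySem.Str.isIn "cannot" lower || PySem.Str.isIn "failed" lower || PySem.Str.isIn "bad version" lower then summary.modify "errors" 0 (· + 1) else summary
  let summary := if PySem.Str.isIn "warning" lower || PySem.Str.isIn "unsupported" lower then summary.modify "warnings" 0 (· + 1) else summary
  let summary := if PySem.Str.isIn "missing" lower || PySem.Str.isIn "cannot open" lower || PySem.Str.isIn "cannot load" lower then summary.modify "missing" 0 (· + 1) else summary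
  let summary := if PySem.Str.isIn "model" lower || PySem.Str.isIn "model.cfg" lower || PySem.Str.isIn "skeleton" lower then summary.modify "model" 0 (· + 1) else summary
  let summary := if PySem.Str.isIn "texture" lower || PySem.Str.isIn ".paa" lower || PySem.Str.isIn ".rvmat" lower then summary.modify "texture" 0 (· + 1) else summary
  summary

def parse_tool_output_summary (tool_name : String) (lines : List String) : List (String × Int) :=
  let summary : PySem.Dict String Int :=
    (((((PySem.Dict.empty.insert "errors" 0).insert "warnings" 0).insert "missing" 0).insert "model" 0).insert "texture" 0)
  (lines.foldl pvStepA summary).items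

-- ===== PORT B =====
-- Source B's helper hits(subs): the number of lowercased lines containing some sub (a 0/1-sum, i.e. a countP)
def pvHits (subs : List String) (lows : List String) : Int :=
  (lows.countP (fun low => subs.any (fun s => PySem.Str.isIn s low)) : Int)

def parse_tool_output_summary_alt (tool_name : String) (lines : List String) : List (String × Int) :=
  let lows := lines.map PySem.Str.lower
  [("errors",   pvHits ["error", "cannot", "failed", "bad version"] lows),
   ("warnings", pvHits ["warning", "unsupported"] lows),
   ("missing",  pvHits ["missing", "cannot open", "cannot load"] lows),
   ("model",    pvHits ["model", "skeleton"] lows),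
   ("texture",  pvHits ["texture", ".paa", ".rvmat"] lows)]

-- ===== PRECONDITION & SPEC =====
def Spec_parse_tool_output_summary (tool_name : String) (lines : List String) (out : List (String × Int)) : Prop := out = parse_tool_output_summary_alt tool_name lines
instance (tool_name : String) (lines : List String) (out : List (String × Int)) : Decidable (Spec_parse_tool_output_summary tool_name lines out) := by unfold Spec_parse_tool_output_summary; infer_instance

-- ===== CLAIM (what is proved, stated in full; the proofs are below) =====
def Claim_equal_parse_tool_output_summary : Prop := ∀ (tool_name : String) (lines : List String), Dom_parse_tool_output_summary tool_name lines → Spec_parse_tool_output_summary tool_name lines (parse_tool_output_summary tool_name lines)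

-- ===== LEMMAS AND PROOFS =====

-- "model.cfg" occurring in a line implies "model" does, so A's model-branch condition equals B's
theorem pv_model_absorb (l : List Char) :
    (PySem.Chars.isIn ['m','o','d','e','l'] l || (PySem.Chars.isIn ['m','o','d','e','l','.','c','f','g'] l
       || PySem.Chars.isIn ['s','k','e','l','e','t','o','n'] l))
      = (PySem.Chars.isIn ['m','o','d','e','l'] l || PySem.Chars.isIn ['s','k','e','l','e','t','o','n'] l) := by
  cases hM : PySem.Chars.isIn ['m','o','d','e','l'] l
  · have h2 : PySem.Chars.isIn ['m','o','d','e','l','.','c','f','g'] l = false := by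
      rw [PySem.Chars.isIn_eq_false_iff] at hM ⊢
      intro hin
      exact hM (List.IsInfix.trans (List.IsPrefix.isInfix (by decide)) hin)
    simp [h2]
  · simp

-- the same absorption, phrased on Strings as it appears in the ports
theorem pv_model_absorb_str (l : String) :
    (PySem.Str.isIn "model" l || (PySem.Str.isIn "model.cfg" l || PySem.Str.isIn "skeleton" l))
      = (PySem.Str.isIn "model" l || PySem.Str.isIn "skeleton" l) := by
  simp only [PySem.Str.isIn_eq]
  exact pv_model_absorb _

set_option maxHeartbeats 1600000 in
-- loop invariant: folding A's step over the five-counter dict adds B's per-category counts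
theorem pv_foldA (lines : List String) : ∀ (a b c m t : Int),
    lines.foldl pvStepA (PySem.Dict.mk [("errors", a), ("warnings", b), ("missing", c), ("model", m), ("texture", t)])
      = PySem.Dict.mk
          [("errors",   a + pvHits ["error", "cannot", "failed", "bad version"] (lines.map PySem.Str.lower)),
           ("warnings", b + pvHits ["warning", "unsupported"] (lines.map PySem.Str.lower)),
           ("missing",  c + pvHits ["missing", "cannot open", "cannot load"] (lines.map PySem.Str.lower)),
           ("model",    m + pvHits ["model", "skeleton"] (lines.map PySem.Str.lower)),
           ("texture",  t + pvHits ["texture", ".paa", ".rvmat"] (lines.map PySem.Str.lower))] := by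
  induction lines with
  | nil => intro a b c m t; simp [pvHits]
  | cons line rest ih =>
    intro a b c m t
    have hstep : pvStepA (PySem.Dict.mk [("errors", a), ("warnings", b), ("missing", c), ("model", m), ("texture", t)]) line
        = PySem.Dict.mk
            [("errors", if PySem.Str.isIn "error" (PySem.Str.lower line) || PySem.Str.isIn "cannot" (PySem.Str.lower line) || PySem.Str.isIn "failed" (PySem.Str.lower line) || PySem.Str.isIn "bad version" (PySem.Str.lower line) then a + 1 else a),
             ("warnings", if PySem.Str.isIn "warning" (PySem.Str.lower line) || PySem.Str.isIn "unsupported" (PySem.Str.lower line) then b + 1 else b),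
             ("missing", if PySem.Str.isIn "missing" (PySem.Str.lower line) || PySem.Str.isIn "cannot open" (PySem.Str.lower line) || PySem.Str.isIn "cannot load" (PySem.Str.lower line) then c + 1 else c),
             ("model", if PySem.Str.isIn "model" (PySem.Str.lower line) || PySem.Str.isIn "model.cfg" (PySem.Str.lower line) || PySem.Str.isIn "skeleton" (PySem.Str.lower line) then m + 1 else m),
             ("texture", if PySem.Str.isIn "texture" (PySem.Str.lower line) || PySem.Str.isIn ".paa" (PySem.Str.lower line) || PySem.Str.isIn ".rvmat" (PySem.Str.lower line) then t + 1 else t)] := by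
      unfold pvStepA
      cases h1 : (PySem.Str.isIn "error" (PySem.Str.lower line) || PySem.Str.isIn "cannot" (PySem.Str.lower line) || PySem.Str.isIn "failed" (PySem.Str.lower line) || PySem.Str.isIn "bad version" (PySem.Str.lower line)) <;>
      cases h2 : (PySem.Str.isIn "warning" (PySem.Str.lower line) || PySem.Str.isIn "unsupported" (PySem.Str.lower line)) <;>
      cases h3 : (PySem.Str.isIn "missing" (PySem.Str.lower line) || PySem.Str.isIn "cannot open" (PySem.Str.lower line) || PySem.Str.isIn "cannot load" (PySem.Str.lower line)) <;>
      cases h4 : (PySem.Str.isIn "model" (PySem.Str.lower line) || PySem.Str.isIn "model.cfg" (PySem.Str.lower line) || PySem.Str.isIn "skeleton" (PySem.Str.lower line)) <;>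
      cases h5 : (PySem.Str.isIn "texture" (PySem.Str.lower line) || PySem.Str.isIn ".paa" (PySem.Str.lower line) || PySem.Str.isIn ".rvmat" (PySem.Str.lower line)) <;>
      simp only [h1, h2, h3, h4, h5, if_true, if_false, Bool.false_eq_true] <;> rfl
    rw [List.foldl_cons, hstep, ih]
    simp only [pvHits, List.map_cons, List.countP_cons, List.any_cons, List.any_nil, Bool.or_false, Bool.or_assoc]
    rw [pv_model_absorb_str]
    simp only [PySem.Dict.mk.injEq, List.cons.injEq, Prod.mk.injEq, true_and, and_true]
    refine ⟨?_, ?_, ?_, ?_, ?_⟩ <;> (split_ifs <;> push_cast <;> ring)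

-- ===== VERDICT (by name: the statement is the Claim_ definition above) =====
theorem parse_tool_output_summary_spec : Claim_equal_parse_tool_output_summary := by
  intro tool_name lines _
  unfold Spec_parse_tool_output_summary parse_tool_output_summary parse_tool_output_summary_alt
  show (lines.foldl pvStepA (((((PySem.Dict.empty.insert "errors" 0).insert "warnings" 0).insert "missing" 0).insert "model" 0).insert "texture" 0)).items = _
  have hinit : (((((PySem.Dict.empty.insert "errors" (0:Int)).insert "warnings" 0).insert "missing" 0).insert "model" 0).insert "texture" 0)
      = PySem.Dict.mk [("errors", 0), ("warnings", 0), ("missing", 0), ("model", 0), ("texture", 0)] := by decide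
  rw [hinit, pv_foldA]
  simp
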